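-- pv_equiv track=rewrite | github.com/Arsen1302/Code-copy-detector | TestData/solutions/problem_1674_3.py | solution_1674_3
-- ===== SOURCE A (Python) =====
-- from typing import List
--
-- def solution_1674_3(words: List[str]) -> List[int]:
--
--     prefs = {}
--
--     ans = []
--
--     for w in words:
--         for i in range(1, len(w)+1):
--             if w[0:i] not in prefs:
--                 prefs[w[0:i]] = 1
--             else:
--                 prefs[w[0:i]] += 1
--
--     for i, w in enumerate(words):
--         for j in range(1, len(w)+1):
--             if i >= len(ans):
--                 ans.append(prefs[w[0:j]])
--             else:
--                 ans[i] += prefs[w[0:j]]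
--
--
--     return ans
-- ===== SOURCE B (Python) =====
-- from typing import List
--
-- def solution_1674_3(words: List[str]) -> List[int]:
--     # No prefix dictionary and no slicing: the count of the prefix w[:j] equals the
--     # number of words v whose common-prefix length with w is at least j, so compute
--     # the pairwise common-prefix lengths by walking characters and count thresholds.
--     ans = []
--     for i, w in enumerate(words):
--         ls = []
--         for v in words:
--             k = 0
--             while k < len(w) and k < len(v) and w[k] == v[k]:
--                 k += 1
--             ls.append(k)
--         for j in range(1, len(w) + 1):
--             c = sum(1 for L in ls if L >= j)
--             if i >= len(ans):
--                 ans.append(c)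
--             else:
--                 ans[i] += c
--     return ans
-- ===== Notes on version B (the rewrite author's own statement) =====
-- stated objective: alternative
-- what changed: B drops A's prefix-count dictionary and all string slicing: it computes the pairwise common-prefix lengths by walking characters, and obtains each prefix count w[:j] as the number of words whose common-prefix length with w is at least j; only the slot-assembly loop (which A's observable behaviour on empty words depends on) is kept.
import Mathlib
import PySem

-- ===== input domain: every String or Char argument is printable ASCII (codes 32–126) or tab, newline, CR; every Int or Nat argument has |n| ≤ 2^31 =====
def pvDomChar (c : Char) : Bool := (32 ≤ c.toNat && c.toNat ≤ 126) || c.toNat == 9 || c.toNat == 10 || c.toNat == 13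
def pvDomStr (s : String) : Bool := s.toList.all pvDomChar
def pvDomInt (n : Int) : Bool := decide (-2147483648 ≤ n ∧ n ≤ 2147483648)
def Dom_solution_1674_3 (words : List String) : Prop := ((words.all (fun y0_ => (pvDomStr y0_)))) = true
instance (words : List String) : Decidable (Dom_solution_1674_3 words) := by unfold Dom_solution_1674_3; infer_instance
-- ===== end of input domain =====

-- B replaces A's prefix-count dictionary and slicing by pairwise common-prefix lengths:
-- the count of a prefix w[:j] is the number of words whose common-prefix length with w is ≥ j
-- (alternative algorithm, same value on every input).

-- ===== PORT A =====
-- first loop of A: prefs[w[0:i]] counted for every word w, 1 ≤ i ≤ len(w)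
def aPrefs (words : List String) : PySem.Dict String Int :=
  words.foldl (fun prefs w =>
    (PySem.List.pyRange 1 (PySem.Str.len w + 1) 1).foldl (fun prefs i =>
      if prefs.contains (PySem.Str.slice w (some 0) (some i)) = false then
        prefs.insert (PySem.Str.slice w (some 0) (some i)) 1
      else
        prefs.insert (PySem.Str.slice w (some 0) (some i))
          (prefs.getD (PySem.Str.slice w (some 0) (some i)) 0 + 1)) prefs)
    PySem.Dict.empty

-- second loop of A; prefs[w[0:j]] was inserted by the first loop, so the KeyError branch of
-- Python's d[k] is unreachable and getD 0 is exact; ans[i] is only read/set when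
-- 0 ≤ i < len ans (i comes from enumerate and the branch test), so .toNat/.set/.getD are exact
def solution_1674_3 (words : List String) : List Int :=
  (PySem.List.enumerate words 0).foldl (fun ans iw =>
    (PySem.List.pyRange 1 (PySem.Str.len iw.2 + 1) 1).foldl (fun ans j =>
      if (ans.length : Int) ≤ iw.1 then
        ans ++ [(aPrefs words).getD (PySem.Str.slice iw.2 (some 0) (some j)) 0]
      else
        ans.set iw.1.toNat
          (ans.getD iw.1.toNat 0 + (aPrefs words).getD (PySem.Str.slice iw.2 (some 0) (some j)) 0)) ans) []

-- ===== PORT B =====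
-- the inner while loop of Source B, as structural recursion: common-prefix length of two words
def lcpChars : List Char → List Char → Int
  | a :: u, b :: v => if a = b then 1 + lcpChars u v else 0
  | _, _ => 0

def solution_1674_3_alt (words : List String) : List Int :=
  (PySem.List.enumerate words 0).foldl (fun ans iw =>
    let ls := words.foldl (fun acc v => acc ++ [lcpChars iw.2.toList v.toList]) []
    (PySem.List.pyRange 1 (PySem.Str.len iw.2 + 1) 1).foldl (fun ans j =>
      let c := ls.foldl (fun n L => if L ≥ j then n + 1 else n) (0 : Int)
      if (ans.length : Int) ≤ iw.1 then ans ++ [c]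
      else ans.set iw.1.toNat (ans.getD iw.1.toNat 0 + c)) ans) []

-- ===== PRECONDITION & SPEC =====
def Spec_solution_1674_3 (words : List String) (out : List Int) : Prop :=
  out = solution_1674_3_alt words
instance (words : List String) (out : List Int) : Decidable (Spec_solution_1674_3 words out) := by
  unfold Spec_solution_1674_3; infer_instance

-- ===== CLAIM (what is proved, stated in full; the proofs are below) =====
def Claim_equal_solution_1674_3 : Prop := ∀ (words : List String),
  Dom_solution_1674_3 words → Spec_solution_1674_3 words (solution_1674_3 words)

-- ===== LEMMAS AND PROOFS =====

-- Nat-valued common-prefix length, for arithmetic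
def lcpN : List Char → List Char → Nat
  | a :: u, b :: v => if a = b then lcpN u v + 1 else 0
  | _, _ => 0

theorem lcpChars_eq (u v : List Char) : lcpChars u v = (lcpN u v : Int) := by
  induction u generalizing v with
  | nil => cases v <;> simp [lcpChars, lcpN]
  | cons a u ih =>
    cases v with
    | nil => simp [lcpChars, lcpN]
    | cons b v => by_cases h : a = b <;> simp [lcpChars, lcpN, h, ih] <;> omega

theorem lcpN_le_right (u v : List Char) : lcpN u v ≤ v.length := by
  induction u generalizing v with
  | nil => cases v <;> simp [lcpN]
  | cons a u ih =>
    cases v with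
    | nil => simp [lcpN]
    | cons b v =>
      by_cases h : a = b <;> simp [lcpN, h]
      exact ih v

-- j ≤ |u|: u and v share a prefix of length j  iff  j ≤ lcpN u v
theorem take_eq_take_iff_lcpN (u v : List Char) (j : Nat) (hj : j ≤ u.length) :
    (j ≤ v.length ∧ u.take j = v.take j) ↔ j ≤ lcpN u v := by
  induction u generalizing v j with
  | nil =>
    have hj0 : j = 0 := by simpa using hj
    subst hj0; simp
  | cons a u ih =>
    cases j with
    | zero => simp
    | succ j =>
      cases v with
      | nil => simp [lcpN]
      | cons b v =>
        by_cases h : a = b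
        · subst h
          have hl : lcpN (a :: u) (a :: v) = lcpN u v + 1 := by simp [lcpN]
          rw [hl]
          simp only [List.take_succ_cons, List.length_cons]
          rw [show (j + 1 ≤ lcpN u v + 1 ↔ j ≤ lcpN u v) from by omega,
            ← ih v j (by simpa using hj)]
          simp
        · simp [lcpN, h]

-- the list of nonempty prefixes of cs, shortest first
def prefixesL (cs : List Char) : List (List Char) :=
  (List.range cs.length).map (fun k => cs.take (k + 1))

theorem nodup_prefixesL (vs : List Char) : (prefixesL vs).Nodup := by
  refine List.Nodup.map_on ?_ (List.nodup_range)
  intro x hx y hy hxy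
  have hx' : x < vs.length := List.mem_range.mp hx
  have hy' : y < vs.length := List.mem_range.mp hy
  have := congrArg List.length hxy
  simp [List.length_take] at this
  omega

theorem count_prefixesL (cs vs : List Char) (k : Nat) (hk : k < cs.length) :
    (prefixesL vs).count (cs.take (k + 1)) = if k + 1 ≤ lcpN cs vs then 1 else 0 := by
  have hlen : (cs.take (k + 1)).length = k + 1 := by simp [List.length_take]; omega
  by_cases hL : k + 1 ≤ lcpN cs vs
  · have h2 := (take_eq_take_iff_lcpN cs vs (k + 1) (by omega)).mpr hL
    have hmem : cs.take (k + 1) ∈ prefixesL vs := by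
      rw [h2.2]
      exact List.mem_map.mpr ⟨k, List.mem_range.mpr (by have := lcpN_le_right cs vs; omega), rfl⟩
    rw [if_pos hL]
    exact List.count_eq_one_of_mem (nodup_prefixesL vs) hmem
  · rw [if_neg hL]
    apply List.count_eq_zero_of_not_mem
    intro hmem
    rcases List.mem_map.mp hmem with ⟨k', hk', heq⟩
    have hk'' : k' < vs.length := List.mem_range.mp hk'
    have hlen' := congrArg List.length heq
    simp [List.length_take, hlen] at hlen'
    have hkk : k' = k := by omega
    subst hkk
    exact hL ((take_eq_take_iff_lcpN cs vs (k' + 1) (by omega)).mp ⟨by omega, heq.symm⟩)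

-- the prefix keys A inserts for word w, as Strings
def keyList (w : String) : List String :=
  (PySem.List.pyRange 1 (PySem.Str.len w + 1) 1).map
    (fun i => PySem.Str.slice w (some 0) (some i))

theorem str_len_eq (w : String) : PySem.Str.len w = (w.toList.length : Int) := by
  simp [PySem.Str.len]

theorem slice_ofList (w : String) (k : Nat) :
    PySem.Str.slice w (some 0) (some (1 + (k : Int))) = String.ofList (w.toList.take (k + 1)) := by
  have h : (PySem.Str.slice w (some 0) (some (1 + (k : Int)))).toList = w.toList.take (k + 1) := by
    rw [PySem.Str.toList_slice]
    simp [PySem.Chars.slice_eq_listSlice]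
    rw [PySem.List.slice_to w.toList (by omega)]
    congr 1
    omega
  rw [← String.ofList_toList (s := PySem.Str.slice w (some 0) (some (1 + (k : Int)))), h]

theorem keyList_eq (w : String) :
    keyList w = (prefixesL w.toList).map String.ofList := by
  rw [keyList, prefixesL, str_len_eq, PySem.List.pyRange_one]
  have hn : ((w.toList.length : Int) + 1 - 1).toNat = w.toList.length := by omega
  rw [hn, List.map_map, List.map_map]
  apply List.map_congr_left
  intro k _
  simp only [Function.comp_apply]
  exact slice_ofList w k

theorem ofList_injective : Function.Injective String.ofList := by
  intro a b h
  have := congrArg String.toList h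
  simpa using this

theorem count_keys (words : List String) (p : List Char) :
    (words.flatMap keyList).count (String.ofList p)
      = (words.flatMap (fun v => prefixesL v.toList)).count p := by
  have h1 : words.flatMap keyList
      = (words.flatMap (fun v => prefixesL v.toList)).map String.ofList := by
    rw [List.map_flatMap]
    exact congrArg (fun f => words.flatMap f) (funext fun v => keyList_eq v)
  rw [h1, List.count_map_of_injective _ _ ofList_injective]

-- characterisation of A's dictionary: a key's count is its count among all inserted prefixes
theorem prefs_getD (words : List String) (p : String) :
    (aPrefs words).getD p 0 = ((words.flatMap keyList).count p : Int) := by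
  have hstep : ∀ (d : PySem.Dict String Int) (q : String),
      (if d.contains q = false then d.insert q 1 else d.insert q (d.getD q 0 + 1))
        = d.insert q (d.getD q 0 + 1) := by
    intro d q
    by_cases h : d.contains q
    · simp [h]
    · rw [if_pos (by simpa using h), PySem.Dict.getD_of_not_contains d 0 (by simpa using h)]
      norm_num
  have hinner : ∀ (w : String) (d : PySem.Dict String Int),
      (PySem.List.pyRange 1 (PySem.Str.len w + 1) 1).foldl (fun prefs i =>
        if prefs.contains (PySem.Str.slice w (some 0) (some i)) = false then
          prefs.insert (PySem.Str.slice w (some 0) (some i)) 1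
        else
          prefs.insert (PySem.Str.slice w (some 0) (some i))
            (prefs.getD (PySem.Str.slice w (some 0) (some i)) 0 + 1)) d
      = (keyList w).foldl (fun d q => d.insert q (d.getD q 0 + 1)) d := by
    intro w d
    rw [keyList, List.foldl_map]
    apply PySem.List.foldl_congr_mem
    intro d' i _
    exact hstep d' _
  calc (aPrefs words).getD p 0
      = (words.foldl (fun (d : PySem.Dict String Int) w =>
          (keyList w).foldl (fun d q => d.insert q (d.getD q 0 + 1)) d)
          PySem.Dict.empty).getD p 0 := by
        rw [aPrefs]
        congr 1
        apply PySem.List.foldl_congr_mem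
        intro d w _
        exact hinner w d
    _ = ((words.flatMap keyList).foldl (fun (d : PySem.Dict String Int) q =>
          d.insert q (d.getD q 0 + 1)) PySem.Dict.empty).getD p 0 := by rw [List.foldl_flatMap]
    _ = ((words.flatMap keyList).count p : Int) := by
        rw [PySem.Dict.getD_foldl_insert_add_one]
        simp

-- per position j (1 ≤ j ≤ len w): A's dictionary count of w[:j] equals B's threshold count
theorem sum_indicator {α : Type} (l : List α) (p : α → Prop) [DecidablePred p] :
    (l.map (fun x => if p x then (1 : Nat) else 0)).sum = l.countP (fun x => decide (p x)) := by
  induction l with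
  | nil => simp
  | cons a l ih =>
    rw [List.map_cons, List.sum_cons, ih, List.countP_cons]
    split <;> simp_all <;> omega

theorem c_eq (words : List String) (w : String) (j : Int)
    (hj : j ∈ PySem.List.pyRange 1 (PySem.Str.len w + 1) 1) :
    (aPrefs words).getD (PySem.Str.slice w (some 0) (some j)) 0
    = (words.map (fun v => lcpChars w.toList v.toList)).foldl
        (fun n L => if L ≥ j then n + 1 else n) (0 : Int) := by
  have hjr := (PySem.List.mem_pyRange_one).mp hj
  rw [str_len_eq] at hjr
  have hk : j = 1 + ((j - 1).toNat : Int) := by omega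
  set k : Nat := (j - 1).toNat with hkdef
  have hklen : k < w.toList.length := by omega
  rw [hk, slice_ofList w k, prefs_getD, count_keys, List.count_flatMap]
  have hmap : (words.map (List.count (w.toList.take (k + 1)) ∘ fun (v : String) => prefixesL v.toList))
      = words.map (fun v => if k + 1 ≤ lcpN w.toList v.toList then (1 : Nat) else 0) := by
    apply List.map_congr_left
    intro v _
    simp only [Function.comp_apply]
    exact count_prefixesL w.toList v.toList k hklen
  rw [hmap, sum_indicator, PySem.List.foldl_ite_add_one]
  rw [List.countP_map]
  have hcp : ((fun L => decide (L ≥ 1 + (k : Int))) ∘ fun (v : String) => lcpChars w.toList v.toList)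
      = fun (v : String) => decide (k + 1 ≤ lcpN w.toList v.toList) := by
    funext v
    simp only [Function.comp_apply, lcpChars_eq, decide_eq_decide]
    omega
  rw [hcp, zero_add]

-- ===== VERDICT (by name: the statement is the Claim_ definition above) =====
theorem solution_1674_3_spec : Claim_equal_solution_1674_3 := by
  intro words _
  unfold Spec_solution_1674_3
  unfold solution_1674_3 solution_1674_3_alt
  apply PySem.List.foldl_congr_mem
  intro ans iw _
  simp only [PySem.List.foldl_append_singleton_eq_map, List.nil_append]
  apply PySem.List.foldl_congr_mem
  intro ans' j hj
  rw [c_eq words iw.2 j hj]
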